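-- pv_equiv track=rewrite | github.com/LEGENDmathlava/LEG_BOT | my_commands/LEG_commands/TETRIS_GAME/TETRIS_control.py | block_rot
-- ===== SOURCE A (Python) =====
-- def block_rot(block, n: int):
--     temp = [[None for _ in range(4)] for _ in range(4)]
--     if n == 0:
--         for y in range(4):
--             for x in range(4):
--                 temp[y][x] = block[y][x]
--     elif n == 1:
--         for y in range(4):
--             for x in range(4):
--                 temp[y][x] = block[3-x][y]
--     elif n == 2:
--         for y in range(4):
--             for x in range(4):
--                 temp[y][x] = block[3-y][3-x]
--     elif n == 3:
--         for y in range(4):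
--             for x in range(4):
--                 temp[y][x] = block[x][3-y]
--     return temp
-- ===== SOURCE B (Python) =====
-- def block_rot(block, n: int):
--     grid = [[None for _ in range(4)] for _ in range(4)]
--     if 0 <= n <= 3:
--         grid = [[block[y][x] for x in range(4)] for y in range(4)]
--         for _ in range(n):
--             grid = [[grid[3 - x][y] for x in range(4)] for y in range(4)]
--     return grid
-- ===== Notes on version B (the rewrite author's own statement) =====
-- stated objective: simpler
-- what changed: Replaces A's four hardcoded index-formula branches with one copy plus a single 90-degree rotation step applied n times in a loop (all-None grid when n is outside 0..3, as in A).
import Mathlib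
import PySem

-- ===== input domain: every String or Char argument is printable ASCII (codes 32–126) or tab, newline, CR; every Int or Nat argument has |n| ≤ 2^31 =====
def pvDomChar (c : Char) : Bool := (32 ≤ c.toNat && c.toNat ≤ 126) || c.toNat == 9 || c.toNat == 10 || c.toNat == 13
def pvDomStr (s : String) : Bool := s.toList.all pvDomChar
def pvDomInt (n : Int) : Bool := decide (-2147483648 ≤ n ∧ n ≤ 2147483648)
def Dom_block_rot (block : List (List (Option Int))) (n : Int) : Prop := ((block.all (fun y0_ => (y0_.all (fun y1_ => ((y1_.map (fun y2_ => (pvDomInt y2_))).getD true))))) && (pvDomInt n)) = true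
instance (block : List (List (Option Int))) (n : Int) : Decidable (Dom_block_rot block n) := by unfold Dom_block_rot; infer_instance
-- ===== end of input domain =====

-- B: one generic 90-degree rotation step applied n times instead of A's four hardcoded index formulas (objective: simpler).
-- ===== PORT A =====
-- block[i][j] with getD defaults; inside Pre_ every index is in range, so this is exact (IndexError inputs are excluded by Pre_).
def pvGet2 (block : List (List (Option Int))) (i j : Int) : Option Int :=
  (PySem.List.pyGet? ((PySem.List.pyGet? block i).getD []) j).getD none

def block_rot (block : List (List (Option Int))) (n : Int) : List (List (Option Int)) :=
  let temp : List (List (Option Int)) := (List.range 4).map (fun _ => (List.range 4).map (fun _ => none))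
  if n = 0 then (List.range 4).map (fun y => (List.range 4).map (fun x => pvGet2 block (y : Int) (x : Int)))
  else if n = 1 then (List.range 4).map (fun y => (List.range 4).map (fun x => pvGet2 block (3 - (x : Int)) (y : Int)))
  else if n = 2 then (List.range 4).map (fun y => (List.range 4).map (fun x => pvGet2 block (3 - (y : Int)) (3 - (x : Int))))
  else if n = 3 then (List.range 4).map (fun y => (List.range 4).map (fun x => pvGet2 block (x : Int) (3 - (y : Int))))
  else temp

-- ===== PORT B =====
def pvRotStep (cur : List (List (Option Int))) : List (List (Option Int)) :=
  (List.range 4).map (fun y => (List.range 4).map (fun x => pvGet2 cur (3 - (x : Int)) (y : Int)))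

def block_rot_alt (block : List (List (Option Int))) (n : Int) : List (List (Option Int)) :=
  let grid : List (List (Option Int)) := (List.range 4).map (fun _ => (List.range 4).map (fun _ => none))
  if 0 ≤ n ∧ n ≤ 3 then
    let grid := (List.range 4).map (fun y => (List.range 4).map (fun x => pvGet2 block (y : Int) (x : Int)))
    (List.range n.toNat).foldl (fun cur _ => pvRotStep cur) grid
  else grid

-- ===== PRECONDITION & SPEC =====
-- Pre_ excludes exactly the inputs where Python A raises IndexError: n in 0..3 with fewer than 4 rows or a short row among the first 4.
def Pre_block_rot (block : List (List (Option Int))) (n : Int) : Prop :=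
  (0 ≤ n ∧ n ≤ 3) → (4 ≤ block.length ∧ ∀ r ∈ block.take 4, 4 ≤ r.length)
instance (block : List (List (Option Int))) (n : Int) : Decidable (Pre_block_rot block n) := by
  unfold Pre_block_rot; infer_instance
def pvWitness_block_rot : List (List (Option Int)) × Int :=
  ([[some 1, none, none, none], [none, some 2, none, none],
    [none, none, some 3, none], [none, none, none, some 4]], 1)
def Spec_block_rot (block : List (List (Option Int))) (n : Int) (out : List (List (Option Int))) : Prop := out = block_rot_alt block n
instance (block : List (List (Option Int))) (n : Int) (out : List (List (Option Int))) : Decidable (Spec_block_rot block n out) := by unfold Spec_block_rot; infer_instance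

-- ===== CLAIM (what is proved, stated in full; the proofs are below) =====
def Claim_equal_block_rot : Prop := ∀ (block : List (List (Option Int))) (n : Int), Dom_block_rot block n → Pre_block_rot block n → Spec_block_rot block n (block_rot block n)

-- ===== LEMMAS AND PROOFS =====

-- ===== VERDICT (by name: the statement is the Claim_ definition above) =====
theorem block_rot_spec : Claim_equal_block_rot := by
  intro block n _ _
  unfold Spec_block_rot
  have h : n = 0 ∨ n = 1 ∨ n = 2 ∨ n = 3 ∨ (n < 0 ∨ 3 < n) := by omega
  rcases h with h | h | h | h | h
  · subst h; rfl
  · subst h; rfl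
  · subst h; rfl
  · subst h; rfl
  · unfold block_rot block_rot_alt
    rcases h with h | h
    · rw [if_neg (by omega), if_neg (by omega), if_neg (by omega), if_neg (by omega),
        if_neg (by omega)]
    · rw [if_neg (by omega), if_neg (by omega), if_neg (by omega), if_neg (by omega),
        if_neg (by omega)]
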